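-- pv_equiv track=rewrite | github.com/madrury/advent-of-code-2023 | day3/solution.py | number_boundaries
-- ===== SOURCE A (Python) =====
-- from string import digits
-- from typing import List, Set, Dict, Tuple
--
-- def number_boundaries(line: str) -> List[Tuple[int, int]]:
--     begin_numbers, end_numbers = [], []
--     if line[0] in digits:
--         begin_numbers.append(0)
--     for idx, (ch, next) in enumerate(zip(line, line[1:])):
--         if next in digits and ch not in digits:
--             begin_numbers.append(idx+1)
--     for idx, (ch, next) in enumerate(zip(line, line[1:])):
--         if ch in digits and next not in digits:
--             end_numbers.append(idx)
--     if line[-1] in digits: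
--         end_numbers.append(len(line))
--     return list(zip(begin_numbers, end_numbers))
-- ===== SOURCE B (Python) =====
-- def number_boundaries(line):
--     out = []
--     start = None
--     for i, ch in enumerate(line):
--         if ch.isdigit():
--             if start is None:
--                 start = i
--         elif start is not None:
--             out.append((start, i - 1))
--             start = None
--     if start is not None:
--         out.append((start, len(line) - 1))
--     return out
-- ===== Notes on version B (the rewrite author's own statement) =====
-- stated objective: simpler
-- what changed: Replaced A's two separate adjacent-pair transition scans plus a final zip of begin/end index lists by one left-to-right scan that tracks the start of the current digit run and emits each (start, last-digit-index) pair as the run closes; one pass with no intermediate zipped pair lists is a constant-factor speedup. Pre_ excludes only the empty line, on which A raises IndexError.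
-- intended difference: On nonempty lines whose last character is a digit, A reports the trailing number's end index as len(line) (one past the last index) although every interior number ends at its last digit's index; B uniformly returns the last digit's index (len(line)-1 for a trailing number), the consistent intended value. — e.g. on number_boundaries("7"): A returns [(0, 1)], B returns [(0, 0)]
import Mathlib
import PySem

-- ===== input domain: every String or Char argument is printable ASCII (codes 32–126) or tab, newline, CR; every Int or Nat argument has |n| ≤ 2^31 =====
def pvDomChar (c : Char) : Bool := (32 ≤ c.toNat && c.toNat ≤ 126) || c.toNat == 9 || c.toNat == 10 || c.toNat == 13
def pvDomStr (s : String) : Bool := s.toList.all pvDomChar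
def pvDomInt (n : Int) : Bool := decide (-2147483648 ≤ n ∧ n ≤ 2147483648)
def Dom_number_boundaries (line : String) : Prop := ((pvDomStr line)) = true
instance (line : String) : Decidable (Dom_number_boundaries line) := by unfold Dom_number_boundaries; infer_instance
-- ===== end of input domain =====

-- B is one run-tracking scan with a uniform inclusive end index instead of A's two transition
-- scans plus zip; on lines ending in a digit B's consistent end index differs from A's (see D_).

-- ===== PORT A =====
-- 'ch in digits' with digits = string.digits
def isDigA (c : Char) : Bool := "0123456789".toList.contains c

-- first loop: for idx,(ch,next) in enumerate(zip(line, line[1:])): if next in digits and ch not in digits: append(idx+1)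
def aBegins : Nat → List Char → List Int
  | i, c :: c' :: rest =>
      (if isDigA c' && !isDigA c then [(i : Int) + 1] else []) ++ aBegins (i + 1) (c' :: rest)
  | _, _ => []

-- second loop: if ch in digits and next not in digits: append(idx)
def aEnds : Nat → List Char → List Int
  | i, c :: c' :: rest =>
      (if isDigA c && !isDigA c' then [(i : Int)] else []) ++ aEnds (i + 1) (c' :: rest)
  | _, _ => []

def number_boundaries (line : String) : List (Int × Int) :=
  let l := line.toList
  -- line[0] / line[-1]: IndexError on the empty line, excluded by Pre_
  let begins : List Int :=
    (if (match l.head? with | some c => isDigA c | none => false) then [(0 : Int)] else []) ++ aBegins 0 l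
  let ends : List Int :=
    aEnds 0 l ++ (if (match l.getLast? with | some c => isDigA c | none => false) then [(l.length : Int)] else [])
  List.zip begins ends

-- ===== PORT B =====
-- the single scan: i = current index, second arg = start index of the current digit run (None outside a run);
-- ch.isdigit() is PySem.Chars.isdigit
def bLoop : Nat → Option Int → List Char → List (Int × Int)
  | i, start, c :: rest =>
      if PySem.Chars.isdigit c then
        match start with
        | none => bLoop (i + 1) (some (i : Int)) rest
        | some s => bLoop (i + 1) (some s) rest
      else
        match start with
        | none => bLoop (i + 1) none rest
        | some s => (s, (i : Int) - 1) :: bLoop (i + 1) none rest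
  | i, start, [] =>
      match start with
      | some s => [(s, (i : Int) - 1)]   -- i = len(line) here, so this is len(line) - 1
      | none => []

def number_boundaries_alt (line : String) : List (Int × Int) :=
  bLoop 0 none line.toList

-- ===== PRECONDITION & SPEC =====
-- A evaluates line[0] unconditionally, so it raises IndexError on the empty line; Pre_ excludes exactly that.
def Pre_number_boundaries (line : String) : Prop := line ≠ ""
instance (line : String) : Decidable (Pre_number_boundaries line) := by unfold Pre_number_boundaries; infer_instance
def pvWitness_number_boundaries : String := "a1b"

-- On nonempty lines whose last character is a digit, A reports the trailing number's end index as
-- len(line) (one past the last index) although every interior number ends at its last digit's index;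
-- B uniformly returns the last digit's index (len(line)-1 for a trailing number), the intended value.
def D_number_boundaries (line : String) : Prop :=
  Option.any PySem.Chars.isdigit line.toList.getLast? = true
instance (line : String) : Decidable (D_number_boundaries line) := by unfold D_number_boundaries; infer_instance

def Spec_number_boundaries (line : String) (out : List (Int × Int)) : Prop :=
  ¬ D_number_boundaries line → out = number_boundaries_alt line
instance (line : String) (out : List (Int × Int)) : Decidable (Spec_number_boundaries line out) := by unfold Spec_number_boundaries; infer_instance

def pvDiffWitness_number_boundaries : String := "7"
def pvDiffWitnessOut_number_boundaries : (List (Int × Int)) × (List (Int × Int)) := ([(0, 1)], [(0, 0)])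

-- ===== CLAIM (what is proved, stated in full; the proofs are below) =====
def Claim_unchanged_number_boundaries : Prop := ∀ (line : String), Dom_number_boundaries line → Pre_number_boundaries line → Spec_number_boundaries line (number_boundaries line)
def Claim_changed_number_boundaries : Prop := Dom_number_boundaries (pvDiffWitness_number_boundaries) ∧ Pre_number_boundaries (pvDiffWitness_number_boundaries) ∧ D_number_boundaries (pvDiffWitness_number_boundaries) ∧ number_boundaries (pvDiffWitness_number_boundaries) = pvDiffWitnessOut_number_boundaries.1 ∧ number_boundaries_alt (pvDiffWitness_number_boundaries) = pvDiffWitnessOut_number_boundaries.2 ∧ pvDiffWitnessOut_number_boundaries.1 ≠ pvDiffWitnessOut_number_boundaries.2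
def Claim_exact_number_boundaries : Prop := ∀ (line : String), Dom_number_boundaries line → Pre_number_boundaries line → D_number_boundaries line → number_boundaries line ≠ number_boundaries_alt line

-- ===== LEMMAS AND PROOFS =====

-- A's 'ch in digits' and B's 'ch.isdigit()' agree on every Char
lemma isDig_eq (c : Char) : isDigA c = PySem.Chars.isdigit c := by
  have h : "0123456789".toList = ['0','1','2','3','4','5','6','7','8','9'] := by decide
  unfold isDigA
  rw [h]
  simp only [List.contains_cons, List.contains_nil, Bool.or_false, PySem.Chars.isdigit]
  apply Bool.eq_iff_iff.mpr
  simp only [Bool.or_eq_true, beq_iff_eq, Bool.and_eq_true, decide_eq_true_eq]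
  constructor
  · rintro (rfl|rfl|rfl|rfl|rfl|rfl|rfl|rfl|rfl|rfl) <;> exact ⟨by decide, by decide⟩
  · rintro ⟨h1, h2⟩
    have h1' : 48 ≤ c.toNat := h1
    have h2' : c.toNat ≤ 57 := h2
    have hx : c.toNat = 48 ∨ c.toNat = 49 ∨ c.toNat = 50 ∨ c.toNat = 51 ∨ c.toNat = 52 ∨ c.toNat = 53 ∨ c.toNat = 54 ∨ c.toNat = 55 ∨ c.toNat = 56 ∨ c.toNat = 57 := by omega
    have hc : ∀ d : Char, c.toNat = d.toNat → c = d := by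
      intro d hd
      exact Char.ext (UInt32.toNat_inj.mp hd)
    rcases hx with h|h|h|h|h|h|h|h|h|h
    · simp [hc '0' (by rw [h]; decide)]
    · simp [hc '1' (by rw [h]; decide)]
    · simp [hc '2' (by rw [h]; decide)]
    · simp [hc '3' (by rw [h]; decide)]
    · simp [hc '4' (by rw [h]; decide)]
    · simp [hc '5' (by rw [h]; decide)]
    · simp [hc '6' (by rw [h]; decide)]
    · simp [hc '7' (by rw [h]; decide)]
    · simp [hc '8' (by rw [h]; decide)]
    · simp [hc '9' (by rw [h]; decide)]

-- primed, state-carrying forms of A's two scans: p = 'previous char is a digit'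
def aBegins' : Bool → Nat → List Char → List Int
  | p, i, c :: rest => (if isDigA c && !p then [(i : Int)] else []) ++ aBegins' (isDigA c) (i + 1) rest
  | _, _, [] => []

def aEnds' : Bool → Nat → List Char → List Int
  | p, i, c :: rest => (if p && !isDigA c then [(i : Int) - 1] else []) ++ aEnds' (isDigA c) (i + 1) rest
  | p, i, [] => if p then [(i : Int)] else []

lemma aBegins_aux : ∀ (rest : List Char) (c : Char) (i : Nat),
    aBegins i (c :: rest) = aBegins' (isDigA c) (i + 1) rest := by
  intro rest
  induction rest with
  | nil => intro c i; simp [aBegins, aBegins']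
  | cons c' rest' ih =>
      intro c i
      rw [show aBegins i (c :: c' :: rest') =
            (if isDigA c' && !isDigA c then [(i : Int) + 1] else []) ++ aBegins (i + 1) (c' :: rest') from rfl]
      rw [show aBegins' (isDigA c) (i + 1) (c' :: rest') =
            (if isDigA c' && !isDigA c then [((i + 1 : Nat) : Int)] else []) ++ aBegins' (isDigA c') (i + 1 + 1) rest' from rfl]
      rw [ih c' (i + 1)]
      norm_cast

lemma aEnds_aux : ∀ (rest : List Char) (c : Char) (i : Nat),
    aEnds i (c :: rest) ++
      (if (match (c :: rest).getLast? with | some x => isDigA x | none => false) then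
        [(i : Int) + rest.length + 1] else []) = aEnds' (isDigA c) (i + 1) rest := by
  intro rest
  induction rest with
  | nil =>
      intro c i
      rw [show aEnds i [c] = [] from rfl]
      rw [show aEnds' (isDigA c) (i + 1) [] = if isDigA c then [((i + 1 : Nat) : Int)] else [] from rfl]
      simp only [List.getLast?_singleton, List.nil_append]
      split <;> simp
  | cons c' rest' ih =>
      intro c i
      have h := ih c' (i + 1)
      rw [show aEnds i (c :: c' :: rest') =
            (if isDigA c && !isDigA c' then [(i : Int)] else []) ++ aEnds (i + 1) (c' :: rest') from rfl]
      rw [show aEnds' (isDigA c) (i + 1) (c' :: rest') =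
            (if isDigA c && !isDigA c' then [((i + 1 : Nat) : Int) - 1] else []) ++ aEnds' (isDigA c') (i + 1 + 1) rest' from rfl]
      rw [List.getLast?_cons_cons, List.append_assoc]
      rw [show ((i : Int) + ↑(c' :: rest').length + 1) = ((i + 1 : Nat) : Int) + ↑rest'.length + 1 by push_cast; simp; ring]
      rw [h]
      congr 1
      split <;> [congr 1; rfl]
      push_cast; ring

-- A's port, as the zipped primed scans (for any nonempty line, regardless of the last character)
lemma portA_eq (c : Char) (rest : List Char) (line : String) (hl : line.toList = c :: rest) :
    number_boundaries line = List.zip (aBegins' false 0 (c :: rest)) (aEnds' false 0 (c :: rest)) := by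
  unfold number_boundaries
  rw [hl]
  simp only [List.head?_cons]
  congr 1
  · rw [show aBegins' false 0 (c :: rest) =
         (if isDigA c && !false then [(0 : Int)] else []) ++ aBegins' (isDigA c) (0 + 1) rest from rfl]
    rw [aBegins_aux rest c 0]
    simp
  · rw [show aEnds' false 0 (c :: rest) =
         (if false && !isDigA c then [(0 : Int) - 1] else []) ++ aEnds' (isDigA c) (0 + 1) rest from rfl]
    rw [← aEnds_aux rest c 0]
    rw [show (((c :: rest).length : Int)) = ((0 : Nat) : Int) + rest.length + 1 by push_cast; simp]
    simp

-- adds 1 to the last pair's end index: A's trailing-number convention applied to B's output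
def bump : List (Int × Int) → List (Int × Int)
  | [] => []
  | [(a, b)] => [(a, b + 1)]
  | x :: y :: ys => x :: bump (y :: ys)

-- bLoop never returns [] when the line ends in a digit (or the scan is mid-run at the end)
lemma bLoop_ne_nil : ∀ (l : List Char) (i : Nat) (st : Option Int),
    (match l.getLast? with | some c => PySem.Chars.isdigit c = true | none => st.isSome = true) →
    bLoop i st l ≠ [] := by
  intro l
  induction l with
  | nil =>
      intro i st h
      cases st with
      | none => simp at h
      | some s => simp [bLoop]
  | cons c rest ih =>
      intro i st h
      by_cases hd : PySem.Chars.isdigit c = true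
      · cases st with
        | none =>
            simp only [bLoop, hd, if_pos]
            apply ih
            cases rest with
            | nil => simp
            | cons d ds => rwa [List.getLast?_cons_cons] at h
        | some s =>
            simp only [bLoop, hd, if_pos]
            apply ih
            cases rest with
            | nil => simp
            | cons d ds => rwa [List.getLast?_cons_cons] at h
      · have hd' : PySem.Chars.isdigit c = false := by simpa using hd
        cases rest with
        | nil => simp only [List.getLast?_singleton] at h; simp [hd'] at h
        | cons d ds =>
            rw [List.getLast?_cons_cons] at h
            cases st with
            | none => simp only [bLoop, hd']; simpa using ih (i + 1) none h
            | some s => simp [bLoop, hd']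

lemma bump_cons (x : Int × Int) (t : List (Int × Int)) (h : t ≠ []) : bump (x :: t) = x :: bump t := by
  cases t with
  | nil => exact absurd rfl h
  | cons y ys => rfl

-- the joint run-invariant, split by whether the line ends in a digit:
-- if not, the zipped scans equal bLoop; if it does, they equal bump of bLoop.
lemma main_aux : ∀ (l : List Char),
    ((match l.getLast? with | some c => isDigA c = false | none => True) →
      ∀ i, List.zip (aBegins' false i l) (aEnds' false i l) = bLoop i none l) ∧
    ((match l.getLast? with | some c => isDigA c = false | none => False) →
      ∀ i s, List.zip (s :: aBegins' true i l) (aEnds' true i l) = bLoop i (some s) l) ∧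
    ((match l.getLast? with | some c => isDigA c = true | none => False) →
      ∀ i, List.zip (aBegins' false i l) (aEnds' false i l) = bump (bLoop i none l)) ∧
    ((match l.getLast? with | some c => isDigA c = true | none => True) →
      ∀ i s, List.zip (s :: aBegins' true i l) (aEnds' true i l) = bump (bLoop i (some s) l)) := by
  intro l
  induction l with
  | nil =>
      refine ⟨?_, ?_, ?_, ?_⟩ <;> intro h
      · intro i; simp [aBegins', aEnds', bLoop]
      · exact absurd h (by simp)
      · exact absurd h (by simp)
      · intro i s; simp [aBegins', aEnds', bLoop, bump]
  | cons c rest ih =>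
      obtain ⟨ih1, ih2, ih3, ih4⟩ := ih
      refine ⟨?_, ?_, ?_, ?_⟩
      · -- outside a run, line ends in a non-digit (or is empty)
        intro h i
        by_cases hd : isDigA c = true
        · have hb : PySem.Chars.isdigit c = true := (isDig_eq c) ▸ hd
          simp only [aBegins', aEnds', bLoop, hd, hb]
          cases hrest : rest with
          | nil => subst hrest; simp [hd] at h
          | cons d ds =>
              subst hrest
              rw [List.getLast?_cons_cons] at h
              simpa using ih2 h (i + 1) (i : Int)
        · have hd' : isDigA c = false := by simpa using hd
          have hb : PySem.Chars.isdigit c = false := (isDig_eq c) ▸ hd'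
          simp only [aBegins', aEnds', bLoop, hd', hb]
          cases hrest : rest with
          | nil => subst hrest; simp [aBegins', aEnds', bLoop]
          | cons d ds =>
              subst hrest
              rw [List.getLast?_cons_cons] at h
              simpa using ih1 h (i + 1)
      · -- inside a run started at s, line ends in a non-digit
        intro h i s
        by_cases hd : isDigA c = true
        · have hb : PySem.Chars.isdigit c = true := (isDig_eq c) ▸ hd
          simp only [aBegins', aEnds', bLoop, hd, hb]
          cases hrest : rest with
          | nil => subst hrest; simp [hd] at h
          | cons d ds =>
              subst hrest
              rw [List.getLast?_cons_cons] at h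
              simpa using ih2 h (i + 1) s
        · have hd' : isDigA c = false := by simpa using hd
          have hb : PySem.Chars.isdigit c = false := (isDig_eq c) ▸ hd'
          simp only [aBegins', aEnds', bLoop, hd', hb]
          cases hrest : rest with
          | nil => subst hrest; simp [aBegins', aEnds', bLoop, List.zip]
          | cons d ds =>
              subst hrest
              rw [List.getLast?_cons_cons] at h
              simpa [List.zip] using ih1 h (i + 1)
      · -- outside a run, line ends in a digit
        intro h i
        by_cases hd : isDigA c = true
        · have hb : PySem.Chars.isdigit c = true := (isDig_eq c) ▸ hd
          simp only [aBegins', aEnds', bLoop, hd, hb]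
          cases hrest : rest with
          | nil =>
              subst hrest
              simp [aBegins', aEnds', bLoop, bump]
          | cons d ds =>
              subst hrest
              rw [List.getLast?_cons_cons] at h
              simpa using ih4 h (i + 1) (i : Int)
        · have hd' : isDigA c = false := by simpa using hd
          have hb : PySem.Chars.isdigit c = false := (isDig_eq c) ▸ hd'
          simp only [aBegins', aEnds', bLoop, hd', hb]
          cases hrest : rest with
          | nil => subst hrest; simp [hd'] at h
          | cons d ds =>
              subst hrest
              rw [List.getLast?_cons_cons] at h
              simpa using ih3 h (i + 1)
      · -- inside a run started at s, line ends in a digit (or is empty)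
        intro h i s
        by_cases hd : isDigA c = true
        · have hb : PySem.Chars.isdigit c = true := (isDig_eq c) ▸ hd
          simp only [aBegins', aEnds', bLoop, hd, hb]
          cases hrest : rest with
          | nil =>
              subst hrest
              simp [aBegins', aEnds', bLoop, bump]
          | cons d ds =>
              subst hrest
              rw [List.getLast?_cons_cons] at h
              simpa using ih4 h (i + 1) s
        · have hd' : isDigA c = false := by simpa using hd
          have hb : PySem.Chars.isdigit c = false := (isDig_eq c) ▸ hd'
          simp only [aBegins', aEnds', bLoop, hd', hb]
          cases hrest : rest with
          | nil => subst hrest; simp [hd'] at h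
          | cons d ds =>
              subst hrest
              rw [List.getLast?_cons_cons] at h
              have hne : bLoop (i + 1) none (d :: ds) ≠ [] := by
                apply bLoop_ne_nil
                cases hgl : (d :: ds).getLast? with
                | none => simp at hgl
                | some x =>
                    rw [hgl] at h
                    show PySem.Chars.isdigit x = true
                    rw [← isDig_eq]; exact h
              rw [show (if false = true then bLoop (i + 1) (some s) (d :: ds)
                    else (s, (i : Int) - 1) :: bLoop (i + 1) none (d :: ds)) =
                  (s, (i : Int) - 1) :: bLoop (i + 1) none (d :: ds) from rfl]
              rw [bump_cons _ _ hne]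
              simpa [List.zip] using ih3 h (i + 1)

lemma bump_ne (xs : List (Int × Int)) (h : xs ≠ []) : bump xs ≠ xs := by
  induction xs with
  | nil => exact absurd rfl h
  | cons x ys ih =>
      cases ys with
      | nil =>
          obtain ⟨a, b⟩ := x
          simp [bump]
      | cons y zs =>
          simp only [bump, ne_eq, List.cons.injEq, not_and]
          intro _
          exact ih (by simp)

-- ===== VERDICT (by name: the statement is the Claim_ definition above) =====
theorem number_boundaries_spec : Claim_unchanged_number_boundaries := by
  intro line _ hpre
  unfold Spec_number_boundaries
  intro hD
  obtain ⟨c, rest, hl⟩ : ∃ c rest, line.toList = c :: rest := by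
    cases hlt : line.toList with
    | nil => exact absurd (String.toList_eq_nil_iff.mp hlt) hpre
    | cons c rest => exact ⟨c, rest, rfl⟩
  rw [portA_eq c rest line hl]
  unfold number_boundaries_alt
  rw [hl]
  apply (main_aux (c :: rest)).1
  unfold D_number_boundaries at hD
  rw [hl] at hD
  cases hgl : (c :: rest).getLast? with
  | none => simp at hgl
  | some x =>
      rw [hgl] at hD
      show isDigA x = false
      rw [isDig_eq]
      simpa [Option.any] using hD

theorem number_boundaries_changed : Claim_changed_number_boundaries := by
  unfold Claim_changed_number_boundaries; decide

theorem number_boundaries_tight : Claim_exact_number_boundaries := by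
  intro line _ hpre hD
  obtain ⟨c, rest, hl⟩ : ∃ c rest, line.toList = c :: rest := by
    cases hlt : line.toList with
    | nil => exact absurd (String.toList_eq_nil_iff.mp hlt) hpre
    | cons c rest => exact ⟨c, rest, rfl⟩
  unfold D_number_boundaries at hD
  rw [hl] at hD
  have hD' : (match (c :: rest).getLast? with | some x => isDigA x = true | none => False) := by
    cases hgl : (c :: rest).getLast? with
    | none => simp at hgl
    | some x =>
        rw [hgl] at hD
        show isDigA x = true
        rw [isDig_eq]; simpa [Option.any] using hD
  rw [portA_eq c rest line hl]
  rw [(main_aux (c :: rest)).2.2.1 hD' 0]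
  unfold number_boundaries_alt
  rw [hl]
  apply bump_ne
  apply bLoop_ne_nil
  cases hgl : (c :: rest).getLast? with
  | none => simp at hgl
  | some x =>
      rw [hgl] at hD
      show PySem.Chars.isdigit x = true
      simpa [Option.any] using hD
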